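-- pv_equiv track=rewrite | github.com/conundrumer/all-isbns | scripts/common.py | get_isbn_code_pos
-- ===== SOURCE A (Python) =====
-- def get_isbn_code_pos(code: int) -> tuple[int, int]:
--     x = 0
--     y = 0
--     i = 0
--     while code > 0:
--         inc = (code % 10) * 10 ** (i // 2)
--         if i % 2 == 0:
--             x += inc
--         else:
--             y += inc
--         code //= 10
--         i += 1
--
--     return x, y
-- ===== SOURCE B (Python) =====
-- def get_isbn_code_pos(code: int) -> tuple[int, int]:
--     if code <= 0:
--         return (0, 0)
--     x, y = get_isbn_code_pos(code // 10)
--     return (code % 10 + 10 * y, x)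
-- ===== Notes on version B (the rewrite author's own statement) =====
-- stated objective: simpler
-- what changed: Replaces the iterative loop with its counter i, parity test and explicit powers of ten by a three-line structural recursion on the quotient by ten that swaps the coordinate pair at each digit.
import Mathlib
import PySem

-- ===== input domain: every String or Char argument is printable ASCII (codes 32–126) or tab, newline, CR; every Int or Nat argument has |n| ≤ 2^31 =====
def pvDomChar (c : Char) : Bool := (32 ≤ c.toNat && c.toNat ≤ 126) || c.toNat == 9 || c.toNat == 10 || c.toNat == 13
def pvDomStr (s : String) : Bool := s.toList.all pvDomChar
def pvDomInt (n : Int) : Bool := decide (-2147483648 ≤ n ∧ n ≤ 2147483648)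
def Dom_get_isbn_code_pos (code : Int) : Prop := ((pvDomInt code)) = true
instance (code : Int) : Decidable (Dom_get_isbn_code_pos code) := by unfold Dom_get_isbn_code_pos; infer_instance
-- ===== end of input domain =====

-- B replaces A's loop (counter i, parity test, explicit powers of ten) by a short
-- structural recursion on code // 10 that swaps the coordinate pair at every digit: simpler.


-- ===== PORT A =====
-- termination lemma cited by both ports' decreasing_by
theorem pv_div10_toNat_lt (code : Int) (h : 0 < code) :
    (PySem.Int.floordiv code 10).toNat < code.toNat := by
  rw [PySem.Int.floordiv_eq_ediv_of_pos (by norm_num)]; omega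

-- the while loop, state (x, y, i, code); Python's `10 ** (i // 2)` ported via `.toNat`
-- on the exponent, exact because i starts at 0 and only increments (i // 2 ≥ 0 here)
def get_isbn_code_pos_loop (x y i code : Int) : Int × Int :=
  if _h : 0 < code then
    let inc := (PySem.Int.mod code 10) * 10 ^ (PySem.Int.floordiv i 2).toNat
    if PySem.Int.mod i 2 = 0 then
      get_isbn_code_pos_loop (x + inc) y (i + 1) (PySem.Int.floordiv code 10)
    else
      get_isbn_code_pos_loop x (y + inc) (i + 1) (PySem.Int.floordiv code 10)
  else
    (x, y)
termination_by code.toNat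
decreasing_by
  all_goals exact pv_div10_toNat_lt code _h

def get_isbn_code_pos (code : Int) : Int × Int :=
  get_isbn_code_pos_loop 0 0 0 code

-- ===== PORT B =====
def get_isbn_code_pos_alt (code : Int) : Int × Int :=
  if _h : code ≤ 0 then
    (0, 0)
  else
    let p := get_isbn_code_pos_alt (PySem.Int.floordiv code 10)
    (PySem.Int.mod code 10 + 10 * p.2, p.1)
termination_by code.toNat
decreasing_by
  exact pv_div10_toNat_lt code (by omega)

-- ===== PRECONDITION & SPEC =====
def Spec_get_isbn_code_pos (code : Int) (out : Int × Int) : Prop := out = get_isbn_code_pos_alt code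
instance (code : Int) (out : Int × Int) : Decidable (Spec_get_isbn_code_pos code out) := by unfold Spec_get_isbn_code_pos; infer_instance

-- ===== CLAIM (what is proved, stated in full; the proofs are below) =====
def Claim_equal_get_isbn_code_pos : Prop := ∀ (code : Int), Dom_get_isbn_code_pos code → Spec_get_isbn_code_pos code (get_isbn_code_pos code)

-- ===== LEMMAS AND PROOFS =====

-- one unfolding of B at a positive argument
theorem alt_pos (code : Int) (h : 0 < code) :
    get_isbn_code_pos_alt code =
      (PySem.Int.mod code 10 + 10 * (get_isbn_code_pos_alt (PySem.Int.floordiv code 10)).2,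
       (get_isbn_code_pos_alt (PySem.Int.floordiv code 10)).1) := by
  rw [get_isbn_code_pos_alt]
  simp [show ¬ code ≤ 0 by omega]

-- loop invariant: the remaining iterations of A's loop contribute B's recursive value,
-- scaled by the power of ten that the counter i encodes, with the pair swapped when i is odd
theorem loop_inv (code : Int) (x y : Int) (p : Nat) (hc : 0 ≤ code) :
    get_isbn_code_pos_loop x y ((2 * p : Nat) : Int) code =
      (x + 10 ^ p * (get_isbn_code_pos_alt code).1, y + 10 ^ p * (get_isbn_code_pos_alt code).2)
    ∧ get_isbn_code_pos_loop x y ((2 * p + 1 : Nat) : Int) code =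
      (x + 10 ^ (p + 1) * (get_isbn_code_pos_alt code).2, y + 10 ^ p * (get_isbn_code_pos_alt code).1) := by
  by_cases h : 0 < code
  · have hd : 0 ≤ PySem.Int.floordiv code 10 := by
      rw [PySem.Int.floordiv_eq_ediv_of_pos (by omega)]; omega
    have IH1 := (loop_inv (PySem.Int.floordiv code 10)
      (x + PySem.Int.mod code 10 * 10 ^ p) y p hd).2
    have IH2 := (loop_inv (PySem.Int.floordiv code 10)
      x (y + PySem.Int.mod code 10 * 10 ^ p) (p + 1) hd).1
    have halt := alt_pos code h
    have hm0 : PySem.Int.mod ((2 * p : Nat) : Int) 2 = 0 := by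
      rw [PySem.Int.mod_eq_emod_of_pos (by norm_num)]; omega
    have hm1 : PySem.Int.mod ((2 * p + 1 : Nat) : Int) 2 = 1 := by
      rw [PySem.Int.mod_eq_emod_of_pos (by norm_num)]; omega
    have hq0 : (PySem.Int.floordiv ((2 * p : Nat) : Int) 2).toNat = p := by
      rw [PySem.Int.floordiv_eq_ediv_of_pos (by norm_num)]; omega
    have hq1 : (PySem.Int.floordiv ((2 * p + 1 : Nat) : Int) 2).toNat = p := by
      rw [PySem.Int.floordiv_eq_ediv_of_pos (by norm_num)]; omega
    have hc1 : ((2 * p : Nat) : Int) + 1 = ((2 * p + 1 : Nat) : Int) := by push_cast; ring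
    have hc2 : ((2 * p + 1 : Nat) : Int) + 1 = ((2 * (p + 1) : Nat) : Int) := by push_cast; ring
    constructor
    · rw [get_isbn_code_pos_loop, dif_pos h]
      simp only [hm0, hq0, hc1, if_true, IH1, halt]
      exact Prod.ext (by simp; try ring) (by simp; try ring)
    · rw [get_isbn_code_pos_loop, dif_pos h]
      simp only [hm1, hq1, hc2]
      rw [if_neg (by norm_num), IH2]
      simp only [halt]
      exact Prod.ext (by simp; try ring) (by simp; try ring)
  · have hz : code = 0 := by omega
    subst hz
    rw [get_isbn_code_pos_loop, get_isbn_code_pos_loop, get_isbn_code_pos_alt]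
    norm_num
termination_by code.toNat
decreasing_by
  all_goals exact pv_div10_toNat_lt code h

-- ===== VERDICT (by name: the statement is the Claim_ definition above) =====
theorem get_isbn_code_pos_spec : Claim_equal_get_isbn_code_pos := by
  intro code _
  unfold Spec_get_isbn_code_pos get_isbn_code_pos
  by_cases h : 0 < code
  · have := (loop_inv code 0 0 0 (by omega)).1
    simpa using this
  · rw [get_isbn_code_pos_loop, get_isbn_code_pos_alt]
    simp [show ¬ 0 < code by omega, show code ≤ 0 by omega]
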